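-- pv_equiv track=rewrite | github.com/UTSA-ICS/galahad | tests/integration/sso_login.py | get_csrf
-- ===== SOURCE A (Python) =====
-- def get_csrf(html):
--
--     csrf = None
--
--     for s in html.split('\n'):
--         s = s.strip()
--         if (s[0:22] == '<input id="csrf_token"'):
--             csrf = s.split('"')[-2]
--             break
--
--     return csrf
-- ===== SOURCE B (Python) =====
-- def get_csrf(html):
--     NEEDLE = '<input id="csrf_token"'
--     pos = html.find(NEEDLE)
--     while pos != -1:
--         line_start = html.rfind('\n', 0, pos) + 1
--         if html[line_start:pos].strip() == '':
--             line_end = html.find('\n', pos)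
--             if line_end == -1:
--                 line_end = len(html)
--             line = html[pos:line_end]
--             q2 = line.rfind('"')
--             q1 = line.rfind('"', 0, q2)
--             return line[q1 + 1:q2]
--         pos = html.find(NEEDLE, pos + 1)
--     return None
-- ===== Notes on version B (the rewrite author's own statement) =====
-- stated objective: alternative
-- what changed: Replaces the split-into-lines loop with a direct substring search over the whole string: find jumps from one needle occurrence to the next, the enclosing line is recovered with rfind/find of newline positions, a whitespace-only check on the segment before the occurrence replaces the per-line strip plus 22-character prefix compare, and the token is cut out between the last two quote positions of the line via rfind instead of building the list of quote-separated fields and indexing its second-to-last element.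
import Mathlib
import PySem

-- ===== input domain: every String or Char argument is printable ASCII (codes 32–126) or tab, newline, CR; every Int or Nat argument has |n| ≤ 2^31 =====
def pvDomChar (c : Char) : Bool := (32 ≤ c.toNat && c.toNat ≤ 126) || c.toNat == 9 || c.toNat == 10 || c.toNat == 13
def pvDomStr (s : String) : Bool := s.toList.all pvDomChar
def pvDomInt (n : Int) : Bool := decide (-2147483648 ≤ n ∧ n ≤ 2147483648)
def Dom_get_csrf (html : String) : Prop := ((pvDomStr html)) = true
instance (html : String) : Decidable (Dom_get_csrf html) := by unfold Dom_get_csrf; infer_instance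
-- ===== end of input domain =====

-- B replaces A's split-into-lines loop by a substring search over the whole string: find jumps
-- between needle occurrences, the enclosing line is recovered with rfind/find of newline
-- positions, and the token is cut between the line's last two quote positions (alternative).

-- ===== PORT A =====
-- the for-loop over html.split('\n') with break
def getCsrfLoopA : List (List Char) → Option (List Char)
  | [] => none
  | s :: rest =>
    let t := PySem.Chars.strip s
    if PySem.Chars.slice t (some 0) (some 22) = "<input id=\"csrf_token\"".toList then
      -- csrf = s.split('"')[-2]; the compared prefix contains two quotes, so the index is
      -- always in range here and pyGet? is never none
      PySem.List.pyGet? (PySem.Chars.splitOn t ['\"']) (-2)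
    else
      getCsrfLoopA rest

def get_csrf (html : String) : Option String :=
  (getCsrfLoopA (PySem.Chars.splitOn html.toList ['\n'])).map String.ofList

-- ===== PORT B =====
-- NEEDLE = '<input id="csrf_token"'
def pvNeedle : List Char := "<input id=\"csrf_token\"".toList

-- termination fact for the while loop: a successful find lands at or after the start and inside s
lemma pvFindFromProgress (s sub : List Char) (k : Int)
    (h : PySem.Chars.findFrom s sub k ≠ -1) :
    k ≤ PySem.Chars.findFrom s sub k ∧ 0 ≤ PySem.Chars.findFrom s sub k ∧
      PySem.Chars.findFrom s sub k ≤ (s.length : Int) := by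
  have key : ∀ st : Int, 0 ≤ st → st ≤ (s.length : Int) →
      PySem.Chars.find (List.drop st.toNat s) sub ≠ -1 →
      0 ≤ st + PySem.Chars.find (List.drop st.toNat s) sub ∧
      st + PySem.Chars.find (List.drop st.toNat s) sub ≤ (s.length : Int) := by
    intro st h0 hstn hne
    have g1 := PySem.Chars.neg_one_le_find (List.drop st.toNat s) sub
    have g2 := PySem.Chars.find_le_length (List.drop st.toNat s) sub
    rw [List.length_drop] at g2
    omega
  unfold PySem.Chars.findFrom at h ⊢
  simp only [Int.toNat_natCast, List.take_length] at h ⊢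
  by_cases hk : k < 0
  · by_cases hkn : k + (s.length : Int) < 0
    · simp only [if_pos hk, if_pos hkn,
        if_neg (by omega : ¬ ((s.length : Int) < 0))] at h ⊢
      by_cases hf : PySem.Chars.find (List.drop (Int.toNat 0) s) sub = -1
      · rw [if_pos hf] at h; exact absurd rfl h
      · rw [if_neg hf] at h ⊢
        have := key 0 le_rfl (by omega) (by simpa using hf)
        simp only [Int.toNat_zero] at this ⊢
        simp only [Int.toNat_zero] at hf
        have g1 := PySem.Chars.neg_one_le_find (List.drop 0 s) sub
        omega
    · simp only [if_pos hk, if_neg hkn,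
        if_neg (by omega : ¬ ((s.length : Int) < k + (s.length : Int)))] at h ⊢
      by_cases hf : PySem.Chars.find (List.drop (k + (s.length : Int)).toNat s) sub = -1
      · rw [if_pos hf] at h; exact absurd rfl h
      · rw [if_neg hf] at h ⊢
        have := key (k + (s.length : Int)) (by omega) (by omega) hf
        have g1 := PySem.Chars.neg_one_le_find (List.drop (k + (s.length : Int)).toNat s) sub
        omega
  · simp only [if_neg hk] at h ⊢
    by_cases hnk : (s.length : Int) < k
    · rw [if_pos hnk] at h; exact absurd rfl h
    · rw [if_neg hnk] at h ⊢
      by_cases hf : PySem.Chars.find (List.drop k.toNat s) sub = -1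
      · rw [if_pos hf] at h; exact absurd rfl h
      · rw [if_neg hf] at h ⊢
        have := key k (by omega) (by omega) hf
        have g1 := PySem.Chars.neg_one_le_find (List.drop k.toNat s) sub
        omega

-- the while loop: pos runs over needle occurrences; if the text between the line start and the
-- occurrence is all whitespace the token is cut between the last two quotes of that line
def getCsrfLoopB (html : List Char) (pos : Int) : Option (List Char) :=
  if hpos : pos = -1 then none
  else
    let lineStart := PySem.Chars.rfindFrom html ['\n'] 0 (some pos) + 1
    if PySem.Chars.strip (PySem.Chars.slice html (some lineStart) (some pos)) = [] then
      let le0 := PySem.Chars.findFrom html ['\n'] pos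
      let lineEnd := if le0 = -1 then (html.length : Int) else le0
      let line := PySem.Chars.slice html (some pos) (some lineEnd)
      let q2 := PySem.Chars.rfind line ['\"']
      let q1 := PySem.Chars.rfindFrom line ['\"'] 0 (some q2)
      some (PySem.Chars.slice line (some (q1 + 1)) (some q2))
    else
      let next := PySem.Chars.findFrom html pvNeedle (pos + 1)
      if hnext : next = -1 then none     -- loop exit (totality guard; loopB at -1 is none anyway)
      else getCsrfLoopB html next
  termination_by (html.length + 2) - (pos + 1).toNat
  decreasing_by
    have h := pvFindFromProgress html pvNeedle (pos + 1) hnext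
    omega

def get_csrf_alt (html : String) : Option String :=
  (getCsrfLoopB html.toList (PySem.Chars.find html.toList pvNeedle)).map String.ofList

-- ===== PRECONDITION & SPEC =====
def Spec_get_csrf (html : String) (out : Option String) : Prop := out = get_csrf_alt html
instance (html : String) (out : Option String) : Decidable (Spec_get_csrf html out) := by unfold Spec_get_csrf; infer_instance

-- ===== CLAIM (what is proved, stated in full; the proofs are below) =====
def Claim_equal_get_csrf : Prop := ∀ (html : String), Dom_get_csrf html → Spec_get_csrf html (get_csrf html)

-- ===== LEMMAS AND PROOFS =====

-- '"' is written '\"' throughout.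

-- facts about the needle literal
lemma needle_ne_nil : pvNeedle ≠ [] := by decide
lemma needle_head : pvNeedle.head? = some '<' := by decide
lemma needle_nl : '\n' ∉ pvNeedle := by decide
lemma needle_count : pvNeedle.count '\"' = 2 := by decide
lemma needle_eqA : "<input id=\"csrf_token\"".toList = pvNeedle := rfl

-- result of splitting a list on a single character (structural reference function)
def split1 (c : Char) : List Char → List (List Char)
  | [] => [[]]
  | a :: rest => if a = c then [] :: split1 c rest else (split1 c rest).modifyHead (a :: ·)

lemma split1_ne_nil (c : Char) (l : List Char) : split1 c l ≠ [] := by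
  cases l with
  | nil => simp [split1]
  | cons a rest =>
    simp only [split1]
    split_ifs
    · simp
    · cases h : split1 c rest with
      | nil => exact absurd h (split1_ne_nil c rest)
      | cons a t => simp [List.modifyHead]

lemma split1_of_not_mem {c : Char} {l : List Char} (h : c ∉ l) : split1 c l = [l] := by
  induction l with
  | nil => rfl
  | cons a rest ih =>
    simp only [List.mem_cons, not_or] at h
    simp [split1, Ne.symm h.1, ih h.2, List.modifyHead]

lemma split1_append (c : Char) (a z : List Char) :
    split1 c (a ++ c :: z) = split1 c a ++ split1 c z := by
  induction a with
  | nil => simp [split1]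
  | cons b a' ih =>
    by_cases hb : b = c
    · subst hb; simp [split1, ih]
    · simp only [List.cons_append, split1, if_neg hb, ih]
      cases h : split1 c a' with
      | nil => exact absurd h (split1_ne_nil c a')
      | cons p t => simp [List.modifyHead]

lemma splitOn_go_single (c : Char) (l : List Char) :
    ∀ (fuel : Nat) (cur : List Char) (acc : List (List Char)),
    l.length < fuel →
    PySem.Chars.splitOn.go [c] fuel l cur acc
      = acc.reverse ++ (split1 c l).modifyHead (cur.reverse ++ ·) := by
  induction l with
  | nil =>
    intro fuel cur acc hf
    match fuel, hf with
    | fuel + 1, _ => simp [PySem.Chars.splitOn.go, split1, List.modifyHead]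
  | cons a rest ih =>
    intro fuel cur acc hf
    match fuel, hf with
    | fuel + 1, hf =>
      have hrest : rest.length < fuel := by simp at hf; omega
      by_cases ha : a = c
      · subst ha
        have hpre : List.isPrefixOf [a] (a :: rest) = true := by
          simp [List.isPrefixOf]
        simp only [PySem.Chars.splitOn.go, hpre, if_true]
        rw [show List.drop ([a].length) (a :: rest) = rest by simp]
        rw [ih fuel [] (cur.reverse :: acc) hrest]
        simp [split1, List.modifyHead]
        cases split1 a rest <;> rfl
      · have hpre : List.isPrefixOf [c] (a :: rest) = false := by
          simp [List.isPrefixOf, BEq.beq]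
          intro h; exact ha h.symm
        simp only [PySem.Chars.splitOn.go, hpre]
        rw [ih fuel (a :: cur) acc hrest]
        simp only [split1, if_neg ha]
        cases h : split1 c rest with
        | nil => exact absurd h (split1_ne_nil c rest)
        | cons p t => simp [List.modifyHead]

lemma splitOn_single (c : Char) (l : List Char) :
    PySem.Chars.splitOn l [c] = split1 c l := by
  unfold PySem.Chars.splitOn
  rw [splitOn_go_single c l (l.length + 1) [] [] (by omega)]
  cases h : split1 c l with
  | nil => exact absurd h (split1_ne_nil c l)
  | cons p t => simp [List.modifyHead]

-- last and first occurrence decompositions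
lemma last_occ {c : Char} {l : List Char} (h : c ∈ l) : ∃ x w, l = x ++ c :: w ∧ c ∉ w := by
  induction l with
  | nil => cases h
  | cons a rest ih =>
    by_cases hr : c ∈ rest
    · obtain ⟨x, w, hxw, hw⟩ := ih hr
      exact ⟨a :: x, w, by simp [hxw], hw⟩
    · have ha : a = c := by
        rcases List.mem_cons.mp h with h' | h'
        · exact h'.symm
        · exact absurd h' hr
      exact ⟨[], rest, by simp [ha], hr⟩

lemma first_occ {c : Char} {l : List Char} (h : c ∈ l) : ∃ x w, l = x ++ c :: w ∧ c ∉ x := by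
  induction l with
  | nil => cases h
  | cons a rest ih =>
    by_cases ha : a = c
    · exact ⟨[], rest, by simp [ha], by simp⟩
    · have hr : c ∈ rest := by
        rcases List.mem_cons.mp h with h' | h'
        · exact absurd h'.symm ha
        · exact h'
      obtain ⟨x, w, hxw, hx⟩ := ih hr
      refine ⟨a :: x, w, by simp [hxw], ?_⟩
      simp only [List.mem_cons, not_or]
      exact ⟨fun h' => ha h'.symm, hx⟩

lemma decomp {l : List Char} (h2 : 2 ≤ l.count '\"') :
    ∃ u v w, l = u ++ '\"' :: (v ++ '\"' :: w) ∧ '\"' ∉ v ∧ '\"' ∉ w := by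
  have hm : '\"' ∈ l := List.count_pos_iff.mp (by omega)
  obtain ⟨x, w, hxw, hw⟩ := last_occ hm
  have hx : '\"' ∈ x := by
    by_contra hnx
    have hcx : x.count '\"' = 0 := List.count_eq_zero.mpr hnx
    have hcw : w.count '\"' = 0 := List.count_eq_zero.mpr hw
    rw [hxw, List.count_append, List.count_cons_self, hcx, hcw] at h2
    omega
  obtain ⟨u, v, huv, hv⟩ := last_occ hx
  exact ⟨u, v, w, by simp [hxw, huv], hv, hw⟩

-- prefix helpers
lemma singleton_prefix_iff (c : Char) (l : List Char) :
    List.isPrefixOf [c] l = true ↔ l.head? = some c := by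
  cases l with
  | nil => simp [List.isPrefixOf]
  | cons a t =>
    constructor
    · intro h
      have hca : c = a := by simpa [List.isPrefixOf] using h
      simp [hca]
    · intro h
      have hac : a = c := by simpa using h
      simp [List.isPrefixOf, hac]

lemma prefix_head? {a l : List Char} (h : a <+: l) (ha : a ≠ []) : l.head? = a.head? := by
  rcases h with ⟨r, rfl⟩
  cases a with
  | nil => exact absurd rfl ha
  | cons x t => rfl

lemma prefix_of_append_of_le {a b r : List Char} (h : a <+: b ++ r) (hle : a.length ≤ b.length) :
    a <+: b := by
  have h2 : a = b.take a.length := by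
    conv_lhs => rw [List.prefix_iff_eq_take.mp h]
    rw [List.take_append, Nat.sub_eq_zero_of_le hle, List.take_zero, List.append_nil]
  rw [h2]
  exact List.take_prefix _ _

lemma infix_of_prefix_drop {sub l : List Char} {j : Nat} (h : sub <+: l.drop j) :
    sub <:+: l := by
  rcases h with ⟨t, ht⟩
  refine ⟨l.take j, t, ?_⟩
  have h2 : l.take j ++ (sub ++ t) = l := by rw [ht, List.take_append_drop]
  simpa [List.append_assoc] using h2

lemma singleton_infix_mem {c : Char} {l : List Char} (h : [c] <:+: l) : c ∈ l := by
  have := h.subset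
  simp at this
  exact this

-- first-occurrence characterisation of find / findFrom
lemma find_eq_natCast_iff (s sub : List Char) (j : Nat) :
    PySem.Chars.find s sub = (j : Int) ↔
      sub <+: s.drop j ∧ ∀ i < j, ¬ sub <+: s.drop i := by
  constructor
  · intro h
    have hnn : 0 ≤ PySem.Chars.find s sub := by omega
    have hs := PySem.Chars.find_spec hnn
    rw [h] at hs
    simpa using hs
  · rintro ⟨hocc, hmin⟩
    have hinf : sub <:+: s := infix_of_prefix_drop hocc
    have hnn : 0 ≤ PySem.Chars.find s sub := (PySem.Chars.find_nonneg_iff s sub).mpr hinf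
    have hs := PySem.Chars.find_spec hnn
    rcases lt_trichotomy (PySem.Chars.find s sub).toNat j with hlt | heq | hgt
    · exact absurd hs.1 (hmin _ hlt)
    · omega
    · exact absurd hocc (hs.2 j hgt)

lemma findFrom_eq_natCast_iff (s sub : List Char) (k j : Nat) (hk : k ≤ s.length) :
    PySem.Chars.findFrom s sub (k : Int) = (j : Int) ↔
      k ≤ j ∧ sub <+: s.drop j ∧ ∀ i, k ≤ i → i < j → ¬ sub <+: s.drop i := by
  constructor
  · intro h
    have hne : PySem.Chars.findFrom s sub (k : Int) ≠ -1 := by rw [h]; omega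
    have hs := PySem.Chars.findFrom_natCast_spec s sub k hk hne
    have htn : (PySem.Chars.findFrom s sub (k : Int)).toNat = j := by omega
    rw [htn] at hs
    refine ⟨by omega, hs.2.1, ?_⟩
    intro i hki hij
    exact hs.2.2 i hki hij
  · rintro ⟨hkj, hocc, hmin⟩
    have hne : PySem.Chars.findFrom s sub (k : Int) ≠ -1 := by
      rw [Ne, PySem.Chars.findFrom_natCast_eq_neg_one_iff s sub k hk]
      push_neg
      have hd : (s.drop k).drop (j - k) = s.drop j := by
        rw [List.drop_drop]
        congr 1
        omega
      exact infix_of_prefix_drop (sub := sub) (hd ▸ hocc)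
    have hs := PySem.Chars.findFrom_natCast_spec s sub k hk hne
    rcases lt_trichotomy (PySem.Chars.findFrom s sub (k : Int)).toNat j with hlt | heq | hgt
    · exact absurd hs.2.1 (hmin _ (by omega) hlt)
    · omega
    · exact absurd hocc (hs.2.2 j (by omega) hgt)

lemma findFrom_gt_len (s sub : List Char) (k : Nat) (h : s.length < k) :
    PySem.Chars.findFrom s sub (k : Int) = -1 := by
  unfold PySem.Chars.findFrom
  simp only
  rw [if_neg (by omega : ¬ ((k : Int) < 0)), if_pos (by omega : ((s.length : Int)) < (k : Int))]

-- rfind on a single-character needle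
lemma rfind1_go_eq (s : List Char) (c : Char) (m : Nat) (hm : s[m]? = some c)
    (hmax : ∀ i, m < i → s[i]? ≠ some c) :
    ∀ j, m ≤ j → PySem.Chars.rfind.go s [c] j = (m : Int) := by
  intro j
  induction j with
  | zero =>
    intro hj
    have hm0 : m = 0 := by omega
    subst hm0
    cases s with
    | nil => simp at hm
    | cons a t =>
      simp only [List.getElem?_cons_zero, Option.some_inj] at hm
      subst hm
      simp [PySem.Chars.rfind.go, List.isPrefixOf]
  | succ j ih =>
    intro hj
    by_cases hmj : m = j + 1
    · subst hmj
      have : List.isPrefixOf [c] (s.drop (j + 1)) = true := by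
        rw [singleton_prefix_iff]
        simpa [List.head?_drop] using hm
      simp only [PySem.Chars.rfind.go]
      simp [this]
    · have hmle : m ≤ j := by omega
      have hfalse : List.isPrefixOf [c] (s.drop (j + 1)) = false := by
        rw [Bool.eq_false_iff]
        intro hcontra
        rw [singleton_prefix_iff] at hcontra
        rw [List.head?_drop] at hcontra
        exact hmax (j + 1) (by omega) hcontra
      simp only [PySem.Chars.rfind.go]
      simp [hfalse]
      exact ih hmle

lemma rfind1_eq (s : List Char) (c : Char) (m : Nat) (hm : s[m]? = some c)
    (hmax : ∀ i, m < i → s[i]? ≠ some c) :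
    PySem.Chars.rfind s [c] = (m : Int) := by
  have hlen : m < s.length := by
    by_contra h
    rw [List.getElem?_eq_none (by omega)] at hm
    cases hm
  unfold PySem.Chars.rfind
  exact rfind1_go_eq s c m hm hmax s.length (by omega)

lemma rfind1_decomp (x w : List Char) (c : Char) (hw : c ∉ w) :
    PySem.Chars.rfind (x ++ c :: w) [c] = (x.length : Int) := by
  apply rfind1_eq
  · rw [List.getElem?_append_right (le_refl _)]
    simp
  · intro i hi
    rw [List.getElem?_append_right (by omega)]
    rw [show i - x.length = (i - x.length - 1) + 1 by omega]
    simp only [List.getElem?_cons_succ]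
    intro hc
    exact hw ((List.mem_iff_getElem?).mpr ⟨_, hc⟩)

lemma rfind1_go_neg (s : List Char) (c : Char) (h : c ∉ s) :
    ∀ j, PySem.Chars.rfind.go s [c] j = -1 := by
  intro j
  induction j with
  | zero =>
    have : List.isPrefixOf [c] s = false := by
      rw [Bool.eq_false_iff, Ne, singleton_prefix_iff]
      intro hc
      cases s with
      | nil => simp at hc
      | cons a t =>
        simp only [List.head?_cons, Option.some_inj] at hc
        exact h (by simp [hc])
    cases s <;> simp [PySem.Chars.rfind.go, this]
  | succ j ih =>
    have : List.isPrefixOf [c] (s.drop (j + 1)) = false := by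
      rw [Bool.eq_false_iff, Ne, singleton_prefix_iff, List.head?_drop]
      intro hc
      exact h ((List.mem_iff_getElem?).mpr ⟨_, hc⟩)
    simp only [PySem.Chars.rfind.go]
    simp [this]
    exact ih

lemma rfind1_neg (s : List Char) (c : Char) (h : c ∉ s) :
    PySem.Chars.rfind s [c] = -1 := by
  unfold PySem.Chars.rfind
  exact rfind1_go_neg s c h s.length

lemma rfindFrom_zero_natCast (s sub : List Char) (p : Nat) (hp : p ≤ s.length) :
    PySem.Chars.rfindFrom s sub 0 (some (p : Int)) = PySem.Chars.rfind (s.take p) sub := by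
  unfold PySem.Chars.rfindFrom
  simp only
  rw [if_neg (by omega : ¬ ((s.length : Int) < (p : Int))),
    if_neg (by omega : ¬ ((p : Int) < 0)),
    if_neg (by omega : ¬ ((0 : Int) < 0)),
    if_neg (by omega : ¬ ((p : Int) < (0 : Int)))]
  simp only [Int.toNat_zero, List.drop_zero, Int.toNat_natCast]
  by_cases h : PySem.Chars.rfind (s.take p) sub = -1
  · rw [if_pos h, h]
  · rw [if_neg h]; omega

-- strip facts
lemma strip_eq_nil_iff (cs : List Char) :
    PySem.Chars.strip cs = [] ↔ ∀ x ∈ cs, PySem.Chars.isspace x = true := by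
  unfold PySem.Chars.strip PySem.Chars.rstrip PySem.Chars.lstrip
  constructor
  · intro h x hx
    have h' : List.dropWhile PySem.Chars.isspace
        ((List.dropWhile PySem.Chars.isspace cs).reverse) = [] := by
      simpa using h
    have h2 : ∀ y ∈ (List.dropWhile PySem.Chars.isspace cs).reverse,
        PySem.Chars.isspace y = true := List.dropWhile_eq_nil_iff.mp h'
    have hx' := hx
    rw [← List.takeWhile_append_dropWhile (p := PySem.Chars.isspace) (l := cs)] at hx'
    rcases List.mem_append.mp hx' with h3 | h3
    · exact List.mem_takeWhile_imp h3
    · exact h2 x (by simpa using h3)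
  · intro h
    have h4 : List.dropWhile PySem.Chars.isspace cs = [] :=
      List.dropWhile_eq_nil_iff.mpr fun x hx => h x hx
    simp [h4]

lemma takeWhile_length_eq {q : Char → Bool} {l : List Char} {p : Nat} {a : Char}
    (h1 : ∀ x ∈ l.take p, q x = true) (h2 : l[p]? = some a) (h3 : q a = false) :
    (l.takeWhile q).length = p := by
  induction l generalizing p with
  | nil => simp at h2
  | cons b t ih =>
    cases p with
    | zero =>
      simp only [List.getElem?_cons_zero, Option.some_inj] at h2
      subst h2
      simp [h3]
    | succ p =>
      have hb : q b = true := h1 b (by simp)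
      rw [List.takeWhile_cons, if_pos hb]
      simp only [List.length_cons]
      rw [ih (fun x hx => h1 x (by simp only [List.take_succ_cons, List.mem_cons]; right; exact hx)) (by simpa using h2)]

lemma lstrip_eq_drop (L : List Char) :
    PySem.Chars.lstrip L = L.drop (L.takeWhile PySem.Chars.isspace).length := by
  unfold PySem.Chars.lstrip
  have h := List.takeWhile_append_dropWhile (p := PySem.Chars.isspace) (l := L)
  calc List.dropWhile PySem.Chars.isspace L
      = (L.takeWhile PySem.Chars.isspace ++ L.dropWhile PySem.Chars.isspace).drop
          (L.takeWhile PySem.Chars.isspace).length := by rw [List.drop_left]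
    _ = L.drop (L.takeWhile PySem.Chars.isspace).length := by rw [h]

-- prefix facts about rstrip
lemma rstrip_prefix (l : List Char) : PySem.Chars.rstrip l <+: l := by
  unfold PySem.Chars.rstrip
  have : List.dropWhile PySem.Chars.isspace l.reverse <:+ l.reverse := List.dropWhile_suffix _
  have := List.reverse_prefix.mpr this
  simpa using this

lemma rstrip_last_quote (x w : List Char) :
    ∃ w₀, PySem.Chars.rstrip (x ++ '\"' :: w) = x ++ '\"' :: w₀ ∧ ∀ a ∈ w₀, a ∈ w := by
  unfold PySem.Chars.rstrip
  have hrev : (x ++ '\"' :: w).reverse = w.reverse ++ '\"' :: x.reverse := by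
    simp
  rw [hrev, List.dropWhile_append]
  by_cases he : (List.dropWhile PySem.Chars.isspace w.reverse).isEmpty
  · refine ⟨[], ?_, by simp⟩
    have : List.dropWhile PySem.Chars.isspace ('\"' :: x.reverse) = '\"' :: x.reverse := by
      rw [List.dropWhile_cons_of_neg]
      simp [PySem.Chars.isspace]
    simp [he, this]
  · refine ⟨(List.dropWhile PySem.Chars.isspace w.reverse).reverse, ?_, ?_⟩
    · simp [he]
    · intro a ha
      simp only [List.mem_reverse] at ha
      have := (List.dropWhile_sublist (l := w.reverse) (p := PySem.Chars.isspace)).subset ha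
      simpa using this

-- the values the two branch bodies produce, on the decomposed matched-line core
lemma valueB (u v w : List Char) (hv : '\"' ∉ v) (hw : '\"' ∉ w) :
    PySem.Chars.slice (u ++ '\"' :: (v ++ '\"' :: w))
      (some (PySem.Chars.rfindFrom (u ++ '\"' :: (v ++ '\"' :: w)) ['\"'] 0
        (some (PySem.Chars.rfind (u ++ '\"' :: (v ++ '\"' :: w)) ['\"'])) + 1))
      (some (PySem.Chars.rfind (u ++ '\"' :: (v ++ '\"' :: w)) ['\"'])) = v := by
  set core := u ++ '\"' :: (v ++ '\"' :: w) with hcore0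
  have hcore : core = (u ++ '\"' :: v) ++ '\"' :: w := by rw [hcore0]; simp
  have hq2 : PySem.Chars.rfind core ['\"'] = (((u ++ '\"' :: v).length : Nat) : Int) := by
    rw [hcore]; exact rfind1_decomp _ _ _ hw
  have htake : core.take (u ++ '\"' :: v).length = u ++ '\"' :: v := by
    rw [hcore, List.take_left]
  have hlen : core.length = (u ++ '\"' :: v).length + 1 + w.length := by
    simp only [hcore0, List.length_append, List.length_cons]
    omega
  have hq1 : PySem.Chars.rfindFrom core ['\"'] 0
      (some (((u ++ '\"' :: v).length : Nat) : Int)) = ((u.length : Nat) : Int) := by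
    rw [rfindFrom_zero_natCast core ['\"'] (u ++ '\"' :: v).length (by omega), htake]
    exact rfind1_decomp _ _ _ hv
  rw [hq2, hq1]
  rw [PySem.Chars.slice_eq_listSlice]
  rw [show ((u.length : Int) + 1) = ((u.length + 1 : Nat) : Int) by push_cast; ring]
  rw [PySem.List.slice_natCast]
  have hdrop : core.drop (u.length + 1) = v ++ '\"' :: w := by
    rw [show core = (u ++ ['\"']) ++ (v ++ '\"' :: w) by rw [hcore0]; simp]
    rw [List.drop_left' (by simp)]
  rw [hdrop]
  rw [show (u ++ '\"' :: v).length - (u.length + 1) = v.length by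
    simp only [List.length_append, List.length_cons]; omega]
  rw [List.take_left]

lemma valueA (u v w : List Char) (hv : '\"' ∉ v) (hw : '\"' ∉ w) :
    PySem.List.pyGet? (PySem.Chars.splitOn
      (PySem.Chars.rstrip (u ++ '\"' :: (v ++ '\"' :: w))) ['\"']) (-2) = some v := by
  obtain ⟨w₀, hr, hsub⟩ := rstrip_last_quote (u ++ '\"' :: v) w
  have hrw : PySem.Chars.rstrip (u ++ '\"' :: (v ++ '\"' :: w))
      = u ++ '\"' :: (v ++ '\"' :: w₀) := by
    have h1 : u ++ '\"' :: (v ++ '\"' :: w) = (u ++ '\"' :: v) ++ '\"' :: w := by simp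
    rw [h1, hr]; simp
  have hw₀ : '\"' ∉ w₀ := fun h => hw (hsub _ h)
  rw [hrw, splitOn_single, split1_append, split1_append, split1_of_not_mem hv,
    split1_of_not_mem hw₀]
  set xs := split1 '\"' u ++ ([v] ++ [w₀]) with hxs
  have hlen2 : xs.length = (split1 '\"' u).length + 2 := by rw [hxs]; simp
  rw [PySem.List.pyGet?_neg_ofNat xs 2 (by omega) (by omega)]
  rw [show xs.length - 2 = (split1 '\"' u).length by omega]
  rw [hxs, List.getElem?_append_right (le_refl _)]
  simp

-- A's match condition coincides with startswith on the lstripped line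
lemma matchA_iff (s : List Char) :
    (PySem.Chars.slice (PySem.Chars.strip s) (some 0) (some 22) = pvNeedle)
      ↔ PySem.Chars.startswith (PySem.Chars.lstrip s) pvNeedle = true := by
  have hslice : PySem.Chars.slice (PySem.Chars.strip s) (some 0) (some 22)
      = (PySem.Chars.strip s).take 22 := by
    rw [PySem.Chars.slice_eq_listSlice]
    rw [show ((0 : Int)) = ((0 : Nat) : Int) by simp, show ((22 : Int)) = ((22 : Nat) : Int) by simp]
    rw [PySem.List.slice_natCast]
    simp
  rw [hslice, PySem.Chars.startswith_iff]
  have hstrip : PySem.Chars.strip s = PySem.Chars.rstrip (PySem.Chars.lstrip s) := rfl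
  constructor
  · intro h
    have h1 : pvNeedle <+: PySem.Chars.strip s := by
      rw [← h]; exact List.take_prefix _ _
    exact h1.trans (by rw [hstrip]; exact rstrip_prefix _)
  · rintro ⟨r, hr⟩
    have hN : pvNeedle = "<input id=\"csrf_token".toList ++ ['\"'] := by
      decide
    have hcore : PySem.Chars.lstrip s = "<input id=\"csrf_token".toList ++ '\"' :: r := by
      rw [← hr, hN]; simp
    obtain ⟨w₀, hw₀, -⟩ := rstrip_last_quote ("<input id=\"csrf_token".toList) r
    rw [hstrip, hcore, hw₀]
    rw [show "<input id=\"csrf_token".toList ++ '\"' :: w₀ = pvNeedle ++ w₀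
      by rw [hN]; simp]
    rw [List.take_left' (by decide)]

-- A's loop, one step
lemma loopA_cons (L : List Char) (rest : List (List Char)) :
    getCsrfLoopA (L :: rest)
      = if PySem.Chars.startswith (PySem.Chars.lstrip L) pvNeedle = true
        then PySem.List.pyGet? (PySem.Chars.splitOn (PySem.Chars.strip L) ['\"']) (-2)
        else getCsrfLoopA rest := by
  by_cases h : PySem.Chars.startswith (PySem.Chars.lstrip L) pvNeedle = true
  · rw [if_pos h]
    simp only [getCsrfLoopA, needle_eqA]
    rw [if_pos ((matchA_iff L).mpr h)]
  · rw [if_neg h]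
    simp only [getCsrfLoopA, needle_eqA]
    rw [if_neg (fun hc => h ((matchA_iff L).mp hc))]

-- the loop condition of B, named (proof-side only)
def bValid (html : List Char) (p : Int) : Prop :=
  PySem.Chars.strip (PySem.Chars.slice html
    (some (PySem.Chars.rfindFrom html ['\n'] 0 (some p) + 1)) (some p)) = []

-- the extraction branch of B, named (proof-side only)
def bExtract (html : List Char) (pos : Int) : Option (List Char) :=
  let le0 := PySem.Chars.findFrom html ['\n'] pos
  let lineEnd := if le0 = -1 then (html.length : Int) else le0
  let line := PySem.Chars.slice html (some pos) (some lineEnd)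
  let q2 := PySem.Chars.rfind line ['\"']
  let q1 := PySem.Chars.rfindFrom line ['\"'] 0 (some q2)
  some (PySem.Chars.slice line (some (q1 + 1)) (some q2))

lemma loopB_neg_one (html : List Char) : getCsrfLoopB html (-1) = none := by
  rw [getCsrfLoopB]
  simp

lemma loopB_step_valid (html : List Char) (pos : Int) (h : pos ≠ -1)
    (hb : bValid html pos) : getCsrfLoopB html pos = bExtract html pos := by
  rw [getCsrfLoopB, dif_neg h]
  unfold bValid at hb
  rw [if_pos hb]
  rfl

lemma loopB_step_invalid (html : List Char) (pos : Int) (h : pos ≠ -1)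
    (hb : ¬ bValid html pos) :
    getCsrfLoopB html pos
      = getCsrfLoopB html (PySem.Chars.findFrom html pvNeedle (pos + 1)) := by
  rw [getCsrfLoopB, dif_neg h]
  unfold bValid at hb
  rw [if_neg hb]
  by_cases hn : PySem.Chars.findFrom html pvNeedle (pos + 1) = -1
  · rw [dif_pos hn, hn, loopB_neg_one]
  · rw [dif_neg hn]

-- transfers along a prefix
lemma take_prefix_eq {L html : List Char} (hpre : L <+: html) {p : Nat} (hp : p ≤ L.length) :
    html.take p = L.take p := by
  rcases hpre with ⟨r, rfl⟩
  rw [List.take_append, Nat.sub_eq_zero_of_le hp, List.take_zero, List.append_nil]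

lemma getElem?_prefix_eq {L html : List Char} (hpre : L <+: html) {i : Nat} (hi : i < L.length) :
    html[i]? = L[i]? := by
  rcases hpre with ⟨r, rfl⟩
  exact List.getElem?_append_left hi

-- an occurrence of the needle starts with '<'
lemma occ_head {html : List Char} {i : Nat} (h : pvNeedle <+: html.drop i) :
    html[i]? = some '<' := by
  have h2 := prefix_head? h needle_ne_nil
  rw [List.head?_drop] at h2
  rw [h2, needle_head]

lemma ws_front_no_occ {html : List Char} {i p : Nat} (hi : i < p)
    (hws : ∀ x ∈ html.take p, PySem.Chars.isspace x = true)
    (h : pvNeedle <+: html.drop i) : False := by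
  have hh := occ_head h
  have hmem : '<' ∈ html.take p := by
    rw [List.mem_iff_getElem?]
    refine ⟨i, ?_⟩
    rw [List.getElem?_take_of_lt hi]
    exact hh
  exact absurd (hws '<' hmem) (by decide)

lemma match_facts {L : List Char} (hm : PySem.Chars.startswith (PySem.Chars.lstrip L) pvNeedle = true) :
    pvNeedle <+: L.drop (L.takeWhile PySem.Chars.isspace).length ∧
    (L.takeWhile PySem.Chars.isspace).length ≤ L.length := by
  rw [PySem.Chars.startswith_iff] at hm
  rw [lstrip_eq_drop] at hm
  exact ⟨hm, (List.takeWhile_prefix _).length_le⟩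

lemma match_core {L html : List Char} (hpre : L <+: html)
    (hm : PySem.Chars.startswith (PySem.Chars.lstrip L) pvNeedle = true) :
    PySem.Chars.find html pvNeedle = ((L.takeWhile PySem.Chars.isspace).length : Int) := by
  obtain ⟨hocc, hle⟩ := match_facts hm
  have hlen := hpre.length_le
  apply (find_eq_natCast_iff _ _ _).mpr
  constructor
  · rcases hpre with ⟨r, rfl⟩
    rw [List.drop_append, Nat.sub_eq_zero_of_le hle, List.drop_zero]
    exact hocc.trans (List.prefix_append _ _)
  · intro i hi hocc_i
    have htw : L.take (L.takeWhile PySem.Chars.isspace).length = L.takeWhile PySem.Chars.isspace :=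
      (List.prefix_iff_eq_take.mp (List.takeWhile_prefix _)).symm
    refine ws_front_no_occ hi ?_ hocc_i
    intro x hx
    rw [take_prefix_eq hpre hle, htw] at hx
    exact List.mem_takeWhile_imp hx

lemma valid_imp_match {L html : List Char} (hpre : L <+: html) {p : Nat} (hp : p < L.length)
    (hoccL : pvNeedle <+: L.drop p)
    (hws : ∀ x ∈ html.take p, PySem.Chars.isspace x = true) :
    PySem.Chars.startswith (PySem.Chars.lstrip L) pvNeedle = true := by
  have hLp : L[p]? = some '<' := by
    have h2 := prefix_head? hoccL needle_ne_nil
    rw [List.head?_drop] at h2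
    rw [h2, needle_head]
  have hwsL : ∀ x ∈ L.take p, PySem.Chars.isspace x = true := by
    intro x hx
    apply hws
    rw [take_prefix_eq hpre (le_of_lt hp)]
    exact hx
  have htwl : (L.takeWhile PySem.Chars.isspace).length = p :=
    takeWhile_length_eq hwsL hLp (by decide)
  rw [PySem.Chars.startswith_iff, lstrip_eq_drop, htwl]
  exact hoccL

lemma bValid_iff_front {html : List Char} {p : Nat} (hnl : '\n' ∉ html.take p)
    (hp : p ≤ html.length) :
    bValid html (p : Int) ↔ ∀ x ∈ html.take p, PySem.Chars.isspace x = true := by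
  unfold bValid
  rw [rfindFrom_zero_natCast html ['\n'] p hp, rfind1_neg _ _ hnl]
  rw [show (-1 : Int) + 1 = ((0 : Nat) : Int) by norm_num]
  rw [PySem.Chars.slice_eq_listSlice, PySem.List.slice_natCast]
  simp only [List.drop_zero, Nat.sub_zero]
  exact strip_eq_nil_iff _

lemma bExtract_eq {html lineL : List Char} {pos : Int}
    (hslice : PySem.Chars.slice html (some pos)
      (some (if PySem.Chars.findFrom html ['\n'] pos = -1 then (html.length : Int)
             else PySem.Chars.findFrom html ['\n'] pos)) = lineL)
    (u v w : List Char) (hdec : lineL = u ++ '\"' :: (v ++ '\"' :: w))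
    (hv : '\"' ∉ v) (hw : '\"' ∉ w) :
    bExtract html pos = some v := by
  unfold bExtract
  simp only
  rw [hslice, hdec, valueB u v w hv hw]

lemma loopB_match {L html : List Char} (hpre : L <+: html) (hnlL : '\n' ∉ L)
    (hm : PySem.Chars.startswith (PySem.Chars.lstrip L) pvNeedle = true)
    (hrest : html = L ∨ ∃ R, html = L ++ '\n' :: R) :
    getCsrfLoopB html (PySem.Chars.find html pvNeedle)
      = PySem.List.pyGet? (PySem.Chars.splitOn (PySem.Chars.strip L) ['\"']) (-2) := by
  obtain ⟨hocc, hle⟩ := match_facts hm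
  have hfind := match_core hpre hm
  set p0 := (L.takeWhile PySem.Chars.isspace).length with hp0
  rw [hfind]
  have hp0lt : p0 < L.length := by
    by_contra hc
    rw [List.drop_eq_nil_of_le (by omega)] at hocc
    exact needle_ne_nil (List.prefix_nil.mp hocc)
  have hlenhtml : L.length ≤ html.length := hpre.length_le
  have htw : L.take p0 = L.takeWhile PySem.Chars.isspace :=
    (List.prefix_iff_eq_take.mp (List.takeWhile_prefix _)).symm
  have htake : html.take p0 = L.takeWhile PySem.Chars.isspace := by
    rw [take_prefix_eq hpre (by omega), htw]
  have hnltake : '\n' ∉ html.take p0 := by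
    rw [htake]
    intro hmem
    exact hnlL ((List.takeWhile_prefix _).subset hmem)
  have hws : ∀ x ∈ html.take p0, PySem.Chars.isspace x = true := by
    rw [htake]
    exact fun x hx => List.mem_takeWhile_imp hx
  have hvalid : bValid html (p0 : Int) := (bValid_iff_front hnltake (by omega)).mpr hws
  rw [loopB_step_valid html (p0 : Int) (by omega) hvalid]
  -- the needle prefix puts two quotes on the lstripped line
  have hcount : 2 ≤ (PySem.Chars.lstrip L).count '\"' := by
    rw [PySem.Chars.startswith_iff] at hm
    rcases hm with ⟨r, hr⟩
    rw [← hr, List.count_append, needle_count]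
    omega
  obtain ⟨u, v, w, hdec, hv, hw⟩ := decomp hcount
  have hls : PySem.Chars.lstrip L = L.drop p0 := lstrip_eq_drop L
  -- compute the line slice in both shapes of html
  have hstrip : PySem.Chars.strip L = PySem.Chars.rstrip (PySem.Chars.lstrip L) := rfl
  rcases hrest with heq | ⟨R, rfl⟩
  · subst heq
    have hle0 : PySem.Chars.findFrom html ['\n'] (p0 : Int) = -1 := by
      rw [PySem.Chars.findFrom_natCast_eq_neg_one_iff html ['\n'] p0 (by omega)]
      intro hinf
      exact hnlL (List.drop_subset _ _ (singleton_infix_mem hinf))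
    have hslice : PySem.Chars.slice html (some (p0 : Int))
        (some (if PySem.Chars.findFrom html ['\n'] (p0 : Int) = -1 then (html.length : Int)
               else PySem.Chars.findFrom html ['\n'] (p0 : Int))) = PySem.Chars.lstrip html := by
      rw [hle0, if_pos rfl, PySem.Chars.slice_eq_listSlice, PySem.List.slice_natCast,
        List.take_of_length_le (by rw [List.length_drop]), hls]
    rw [bExtract_eq hslice u v w (by rw [← hdec]) hv hw]
    rw [hstrip, hdec, valueA u v w hv hw]
  · have hElen : (L ++ '\n' :: R).length = L.length + 1 + R.length := by simp; omega
    have hle0 : PySem.Chars.findFrom (L ++ '\n' :: R) ['\n'] (p0 : Int) = ((L.length : Nat) : Int) := by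
      rw [findFrom_eq_natCast_iff (L ++ '\n' :: R) ['\n'] p0 L.length (by omega)]
      refine ⟨by omega, ?_, ?_⟩
      · rw [List.drop_left]
        exact ⟨R, rfl⟩
      · intro i h1 h2 hpref
        have hh := prefix_head? hpref (by decide)
        rw [List.head?_drop] at hh
        have hLi : L[i]? = some '\n' := by
          rw [← getElem?_prefix_eq (⟨'\n' :: R, rfl⟩ : L <+: L ++ '\n' :: R) h2, hh]
          rfl
        exact hnlL (List.mem_iff_getElem?.mpr ⟨_, hLi⟩)
    have hslice : PySem.Chars.slice (L ++ '\n' :: R) (some (p0 : Int))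
        (some (if PySem.Chars.findFrom (L ++ '\n' :: R) ['\n'] (p0 : Int) = -1 then ((L ++ '\n' :: R).length : Int)
               else PySem.Chars.findFrom (L ++ '\n' :: R) ['\n'] (p0 : Int))) = PySem.Chars.lstrip L := by
      rw [hle0, if_neg (show ¬(((L.length : Nat) : Int) = -1) by omega)]
      rw [PySem.Chars.slice_eq_listSlice, PySem.List.slice_natCast]
      have hdropE : (L ++ '\n' :: R).drop p0 = L.drop p0 ++ '\n' :: R := by
        rw [List.drop_append, Nat.sub_eq_zero_of_le (le_of_lt hp0lt), List.drop_zero]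
      rw [hdropE, List.take_append]
      have h1 : L.length - p0 - (L.drop p0).length = 0 := by
        rw [List.length_drop]
        omega
      rw [List.take_of_length_le (by rw [List.length_drop]), h1, List.take_zero,
        List.append_nil, hls]
    rw [bExtract_eq hslice u v w (by rw [← hdec]) hv hw]
    rw [hstrip, hdec, valueA u v w hv hw]

-- the loop skips over a stretch of invalid occurrences
lemma loopB_skip (html : List Char) (m : Nat) : ∀ (k : Nat), k ≤ m → m ≤ html.length + 1 →
    (∀ p : Nat, k ≤ p → p < m → pvNeedle <+: html.drop p → ¬ bValid html (p : Int)) →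
    getCsrfLoopB html (PySem.Chars.findFrom html pvNeedle (k : Int))
      = getCsrfLoopB html (PySem.Chars.findFrom html pvNeedle (m : Int)) := by
  intro k
  induction hd : m - k using Nat.strong_induction_on generalizing k with
  | _ d ih =>
  intro hkm hm hinv
  rcases Nat.eq_or_lt_of_le hkm with rfl | hkm'
  · rfl
  have hklen : k ≤ html.length := by omega
  by_cases hf : PySem.Chars.findFrom html pvNeedle (k : Int) = -1
  · have hf2 : PySem.Chars.findFrom html pvNeedle (m : Int) = -1 := by
      rcases Nat.lt_or_ge html.length m with h | h
      · exact findFrom_gt_len html pvNeedle m h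
      · rw [PySem.Chars.findFrom_natCast_eq_neg_one_iff _ _ m (by omega)]
        rw [PySem.Chars.findFrom_natCast_eq_neg_one_iff _ _ k hklen] at hf
        intro hinf
        apply hf
        rcases hinf with ⟨s, t, hst⟩
        refine ⟨(html.drop k).take (m - k) ++ s, t, ?_⟩
        have hdd : ((html.drop k).drop (m - k)) = html.drop m := by
          rw [List.drop_drop]
          congr 1
          omega
        have h5 : (html.drop k).take (m - k) ++ (s ++ pvNeedle ++ t) = html.drop k := by
          rw [hst, ← hdd, List.take_append_drop]
        calc (html.drop k).take (m - k) ++ s ++ pvNeedle ++ t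
            = (html.drop k).take (m - k) ++ (s ++ pvNeedle ++ t) := by
              simp [List.append_assoc]
          _ = html.drop k := h5
    rw [hf, hf2]
  · have hspec := PySem.Chars.findFrom_natCast_spec html pvNeedle k hklen hf
    set f := PySem.Chars.findFrom html pvNeedle (k : Int) with hfdef
    have hf0 : 0 ≤ f := by omega
    have hocc : pvNeedle <+: html.drop f.toNat := hspec.2.1
    have hflen : f.toNat < html.length := by
      by_contra hc
      rw [List.drop_eq_nil_of_le (by omega)] at hocc
      exact needle_ne_nil (List.prefix_nil.mp hocc)
    by_cases hfm : f < (m : Int)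
    · have hinvf : ¬ bValid html f := by
        have h2 := hinv f.toNat (by omega) (by omega) hocc
        rwa [Int.toNat_of_nonneg hf0] at h2
      rw [loopB_step_invalid html f (by omega) hinvf]
      rw [show f + 1 = ((f.toNat + 1 : Nat) : Int) by omega]
      exact ih (m - (f.toNat + 1)) (by omega) (f.toNat + 1) rfl (by omega) hm
        (fun p hp1 hp2 => hinv p (by omega) hp2)
    · have hfeq : PySem.Chars.findFrom html pvNeedle (m : Int) = f := by
        rw [show f = ((f.toNat : Nat) : Int) by omega]
        rw [findFrom_eq_natCast_iff html pvNeedle m f.toNat (by omega)]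
        exact ⟨by omega, hspec.2.1, fun i h1 h2 => hspec.2.2 i (by omega) h2⟩
      rw [hfeq]

-- shifting the scan across the first line and its newline
lemma shift_drop (L R : List Char) (k : Nat) :
    (L ++ '\n' :: R).drop (L.length + 1 + k) = R.drop k := by
  rw [show L ++ '\n' :: R = (L ++ ['\n']) ++ R by simp, List.drop_append]
  rw [List.drop_eq_nil_of_le (by simp)]
  rw [show L.length + 1 + k - (L ++ ['\n']).length = k by simp]
  simp

lemma shift_take (L R : List Char) (k : Nat) :
    (L ++ '\n' :: R).take (L.length + 1 + k) = L ++ '\n' :: R.take k := by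
  rw [show L ++ '\n' :: R = (L ++ ['\n']) ++ R by simp, List.take_append]
  rw [List.take_of_length_le (by simp)]
  rw [show L.length + 1 + k - (L ++ ['\n']).length = k by simp]
  simp

lemma shift_findFrom (L R sub : List Char) (k : Nat) (hk : k ≤ R.length) :
    PySem.Chars.findFrom (L ++ '\n' :: R) sub ((L.length + 1 + k : Nat) : Int)
      = if PySem.Chars.findFrom R sub (k : Int) = -1 then -1
        else ((L.length + 1 : Nat) : Int) + PySem.Chars.findFrom R sub (k : Int) := by
  rw [PySem.Chars.findFrom_natCast (L ++ '\n' :: R) sub (L.length + 1 + k) (by simp; omega)]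
  rw [PySem.Chars.findFrom_natCast R sub k hk]
  rw [shift_drop]
  by_cases h : PySem.Chars.find (R.drop k) sub = -1
  · simp [h]
  · have hne2 : ¬((k : Int) + PySem.Chars.find (R.drop k) sub = -1) := by
      have hge := PySem.Chars.neg_one_le_find (R.drop k) sub
      omega
    simp only [if_neg h, if_neg hne2]
    push_cast
    ring

lemma shift_slice (L R : List Char) (a b : Nat) :
    PySem.Chars.slice (L ++ '\n' :: R) (some ((L.length + 1 + a : Nat) : Int))
      (some ((L.length + 1 + b : Nat) : Int))
      = PySem.Chars.slice R (some (a : Int)) (some (b : Int)) := by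
  rw [PySem.Chars.slice_eq_listSlice, PySem.Chars.slice_eq_listSlice,
    PySem.List.slice_natCast, PySem.List.slice_natCast, shift_drop]
  congr 1
  omega

lemma shift_lineStart (L R : List Char) (j : Nat) (hj : j ≤ R.length) :
    ∃ ls : Nat, PySem.Chars.rfindFrom R ['\n'] 0 (some (j : Int)) + 1 = (ls : Int) ∧
      PySem.Chars.rfindFrom (L ++ '\n' :: R) ['\n'] 0 (some ((L.length + 1 + j : Nat) : Int)) + 1
        = ((L.length + 1 + ls : Nat) : Int) := by
  rw [rfindFrom_zero_natCast R ['\n'] j hj,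
    rfindFrom_zero_natCast (L ++ '\n' :: R) ['\n'] (L.length + 1 + j) (by simp; omega),
    shift_take]
  by_cases hmem : '\n' ∈ R.take j
  · obtain ⟨x, w, hxw, hw⟩ := last_occ hmem
    refine ⟨x.length + 1, ?_, ?_⟩
    · rw [hxw, rfind1_decomp x w '\n' hw]
      push_cast
      ring
    · rw [hxw, show L ++ '\n' :: (x ++ '\n' :: w) = (L ++ '\n' :: x) ++ '\n' :: w by simp,
        rfind1_decomp _ w '\n' hw]
      push_cast
      simp
      ring
  · refine ⟨0, ?_, ?_⟩
    · rw [rfind1_neg _ _ hmem]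
      norm_num
    · rw [rfind1_decomp L (R.take j) '\n' hmem]
      push_cast
      ring

lemma shift_bValid (L R : List Char) (j : Nat) (hj : j ≤ R.length) :
    (bValid (L ++ '\n' :: R) ((L.length + 1 + j : Nat) : Int) ↔ bValid R (j : Int)) := by
  obtain ⟨ls, h1, h2⟩ := shift_lineStart L R j hj
  unfold bValid
  rw [h1, h2, shift_slice]

lemma shift_bExtract (L R : List Char) (j : Nat) (hj : j ≤ R.length) :
    bExtract (L ++ '\n' :: R) ((L.length + 1 + j : Nat) : Int) = bExtract R (j : Int) := by
  unfold bExtract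
  simp only
  rw [shift_findFrom L R ['\n'] j hj]
  by_cases hd : PySem.Chars.findFrom R ['\n'] (j : Int) = -1
  · rw [if_pos hd, hd]
    rw [if_pos (rfl : (-1 : Int) = -1), if_pos (rfl : (-1 : Int) = -1)]
    rw [show ((L ++ '\n' :: R).length : Int) = ((L.length + 1 + R.length : Nat) : Int) by
      simp only [List.length_append, List.length_cons]; omega]
    rw [show ((R.length : Int)) = ((R.length : Nat) : Int) from rfl]
    rw [shift_slice L R j R.length]
  · rw [if_neg hd]
    have hprog := pvFindFromProgress R ['\n'] (j : Int) hd
    obtain ⟨e, hde⟩ : ∃ e : Nat, PySem.Chars.findFrom R ['\n'] (j : Int) = (e : Int) :=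
      ⟨(PySem.Chars.findFrom R ['\n'] (j : Int)).toNat, by omega⟩
    rw [hde]
    rw [if_neg (by omega : ¬(((L.length + 1 : Nat) : Int) + (e : Int) = -1)),
      if_neg (by omega : ¬((e : Int) = -1))]
    rw [show ((L.length + 1 : Nat) : Int) + (e : Int) = ((L.length + 1 + e : Nat) : Int) by
      push_cast; ring]
    rw [shift_slice L R j e]

lemma loopB_shift (L R : List Char) : ∀ (k : Nat),
    getCsrfLoopB (L ++ '\n' :: R)
      (PySem.Chars.findFrom (L ++ '\n' :: R) pvNeedle ((L.length + 1 + k : Nat) : Int))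
      = getCsrfLoopB R (PySem.Chars.findFrom R pvNeedle (k : Int)) := by
  intro k
  induction hd : R.length + 1 - k using Nat.strong_induction_on generalizing k with
  | _ d ih =>
  by_cases hk : R.length < k
  · rw [findFrom_gt_len R pvNeedle k hk,
      findFrom_gt_len _ pvNeedle _ (by simp; omega), loopB_neg_one, loopB_neg_one]
  · have hk' : k ≤ R.length := by omega
    rw [shift_findFrom L R pvNeedle k hk']
    by_cases hf : PySem.Chars.findFrom R pvNeedle (k : Int) = -1
    · rw [if_pos hf, hf, loopB_neg_one, loopB_neg_one]
    · rw [if_neg hf]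
      have hspec := PySem.Chars.findFrom_natCast_spec R pvNeedle k hk' hf
      obtain ⟨e, hfe⟩ : ∃ e : Nat, PySem.Chars.findFrom R pvNeedle (k : Int) = (e : Int) :=
        ⟨(PySem.Chars.findFrom R pvNeedle (k : Int)).toNat, by omega⟩
      rw [hfe] at hspec ⊢
      simp only [Int.toNat_natCast] at hspec
      have hocc : pvNeedle <+: R.drop e := hspec.2.1
      have hflen : e < R.length := by
        by_contra hc
        rw [List.drop_eq_nil_of_le (by omega)] at hocc
        exact needle_ne_nil (List.prefix_nil.mp hocc)
      have hke : k ≤ e := by omega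
      rw [show ((L.length + 1 : Nat) : Int) + (e : Int)
          = ((L.length + 1 + e : Nat) : Int) by push_cast; ring]
      by_cases hv : bValid R ((e : Nat) : Int)
      · rw [loopB_step_valid R _ (by omega) hv,
          loopB_step_valid (L ++ '\n' :: R) _ (by omega)
            ((shift_bValid L R e (le_of_lt hflen)).mpr hv),
          shift_bExtract L R e (le_of_lt hflen)]
      · rw [loopB_step_invalid R _ (by omega) hv,
          loopB_step_invalid (L ++ '\n' :: R) _ (by omega)
            (fun hc => hv ((shift_bValid L R e (le_of_lt hflen)).mp hc))]
        rw [show ((L.length + 1 + e : Nat) : Int) + 1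
            = ((L.length + 1 + (e + 1) : Nat) : Int) by push_cast; ring]
        rw [show ((e : Nat) : Int) + 1 = ((e + 1 : Nat) : Int) by push_cast; ring]
        exact ih (R.length + 1 - (e + 1)) (by omega) (e + 1) rfl

-- occurrences strictly inside the first line stay inside it (the needle has no newline)
lemma occ_in_line {L R : List Char} {p : Nat} (hp : p < L.length)
    (hocc : pvNeedle <+: (L ++ '\n' :: R).drop p) : pvNeedle <+: L.drop p := by
  have hdp : (L ++ '\n' :: R).drop p = L.drop p ++ '\n' :: R := by
    rw [List.drop_append, Nat.sub_eq_zero_of_le (by omega), List.drop_zero]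
  rw [hdp] at hocc
  have hlen : pvNeedle.length ≤ (L.drop p).length := by
    by_contra hc
    push_neg at hc
    rcases hocc with ⟨t, ht⟩
    have h1 : (pvNeedle ++ t)[(L.drop p).length]? = pvNeedle[(L.drop p).length]? :=
      List.getElem?_append_left (by omega)
    have h2 : (L.drop p ++ '\n' :: R)[(L.drop p).length]? = some '\n' := by
      rw [List.getElem?_append_right (le_refl _)]
      simp
    rw [ht, h2] at h1
    exact needle_nl (List.mem_iff_getElem?.mpr ⟨_, h1.symm⟩)
  exact prefix_of_append_of_le hocc hlen

-- the main correspondence: B's whole-string scan equals A's per-line scan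
lemma mainB (html : List Char) :
    getCsrfLoopB html (PySem.Chars.find html pvNeedle)
      = getCsrfLoopA (PySem.Chars.splitOn html ['\n']) := by
  induction hn : html.length using Nat.strong_induction_on generalizing html with
  | _ n ih =>
  rw [splitOn_single]
  by_cases hmem : '\n' ∈ html
  · obtain ⟨L, R, rfl, hnlL⟩ := first_occ hmem
    have hE : L <+: L ++ '\n' :: R := ⟨'\n' :: R, rfl⟩
    have hElen : (L ++ '\n' :: R).length = L.length + 1 + R.length := by simp; omega
    rw [split1_append, split1_of_not_mem hnlL,
      show [L] ++ split1 '\n' R = L :: split1 '\n' R from rfl, loopA_cons]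
    by_cases hm : PySem.Chars.startswith (PySem.Chars.lstrip L) pvNeedle = true
    · rw [if_pos hm]
      exact loopB_match hE hnlL hm (Or.inr ⟨R, rfl⟩)
    · rw [if_neg hm]
      rw [show PySem.Chars.find (L ++ '\n' :: R) pvNeedle
          = PySem.Chars.findFrom (L ++ '\n' :: R) pvNeedle ((0 : Nat) : Int) by
        rw [show ((0 : Nat) : Int) = (0 : Int) from rfl, PySem.Chars.findFrom_zero]]
      rw [loopB_skip (L ++ '\n' :: R) (L.length + 1) 0 (by omega) (by omega) ?hinv]
      case hinv =>
        intro p hp0 hpm hocc hval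
        apply hm
        have hplt : p < L.length := by
          rcases Nat.lt_or_ge p L.length with h | h
          · exact h
          · exfalso
            have hpe : p = L.length := by omega
            have hh := occ_head hocc
            rw [hpe, List.getElem?_append_right (le_refl _)] at hh
            simp at hh
        have hoccL : pvNeedle <+: L.drop p := occ_in_line hplt hocc
        have htp : (L ++ '\n' :: R).take p = L.take p := take_prefix_eq hE (le_of_lt hplt)
        have hnltake : '\n' ∉ (L ++ '\n' :: R).take p := by
          rw [htp]
          intro h
          exact hnlL (List.take_subset _ _ h)
        have hws := (bValid_iff_front hnltake (by omega)).mp hval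
        exact valid_imp_match hE hplt hoccL hws
      rw [show ((L.length + 1 : Nat) : Int) = ((L.length + 1 + 0 : Nat) : Int) by norm_num]
      rw [loopB_shift L R 0]
      rw [show ((0 : Nat) : Int) = (0 : Int) from rfl, PySem.Chars.findFrom_zero]
      rw [← splitOn_single]
      exact ih R.length (by omega) R rfl
  · rw [split1_of_not_mem hmem, loopA_cons]
    by_cases hm : PySem.Chars.startswith (PySem.Chars.lstrip html) pvNeedle = true
    · rw [if_pos hm]
      exact loopB_match (List.prefix_refl html) hmem hm (Or.inl rfl)
    · rw [if_neg hm]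
      rw [show PySem.Chars.find html pvNeedle
          = PySem.Chars.findFrom html pvNeedle ((0 : Nat) : Int) by
        rw [show ((0 : Nat) : Int) = (0 : Int) from rfl, PySem.Chars.findFrom_zero]]
      rw [loopB_skip html (html.length + 1) 0 (by omega) (by omega) ?hinv]
      case hinv =>
        intro p hp0 hpm hocc hval
        apply hm
        have hplt : p < html.length := by
          by_contra hc
          rw [List.drop_eq_nil_of_le (by omega)] at hocc
          exact needle_ne_nil (List.prefix_nil.mp hocc)
        have hnltake : '\n' ∉ html.take p := fun h => hmem (List.take_subset _ _ h)
        have hws := (bValid_iff_front hnltake (by omega)).mp hval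
        exact valid_imp_match (List.prefix_refl html) hplt hocc hws
      rw [findFrom_gt_len html pvNeedle (html.length + 1) (by omega), loopB_neg_one]
      rfl

-- ===== VERDICT (by name: the statement is the Claim_ definition above) =====

-- ===== VERDICT (by name: the statement is the Claim_ definition above) =====
theorem get_csrf_spec : Claim_equal_get_csrf := by
  intro html _
  show get_csrf html = get_csrf_alt html
  unfold get_csrf get_csrf_alt
  rw [mainB]
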